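-- pv_equiv track=rewrite | github.com/antimatter-ai-org/guardrails | app/core/analysis/span_normalizer.py | _trim_bounds
-- ===== SOURCE A (Python) =====
-- _TRIM_CHARS = " \t\r\n\"'`.,:;!?()[]{}<>"
--
-- def _trim_bounds(text: str, start: int, end: int) -> tuple[int, int]:
--     left = max(0, int(start))
--     right = min(len(text), int(end))
--     while left < right and text[left] in _TRIM_CHARS:
--         left += 1
--     while right > left and text[right - 1] in _TRIM_CHARS:
--         right -= 1
--     return left, right
-- ===== SOURCE B (Python) =====
-- _TRIM_CHARS = " \t\r\n\"'`.,:;!?()[]{}<>"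
--
-- def _trim_bounds(text: str, start: int, end: int) -> tuple[int, int]:
--     left = max(0, int(start))
--     right = min(len(text), int(end))
--     if left >= right:
--         return left, right
--     seg = text[left:right]
--     new_left = left + (len(seg) - len(seg.lstrip(_TRIM_CHARS)))
--     return new_left, new_left + len(seg.strip(_TRIM_CHARS))
-- ===== Notes on version B (the rewrite author's own statement) =====
-- stated objective: idiomatic
-- what changed: The two index-advancing while loops are replaced by slicing the clamped window once and using lstrip/strip with length arithmetic to recover both trimmed bounds.
import Mathlib
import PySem

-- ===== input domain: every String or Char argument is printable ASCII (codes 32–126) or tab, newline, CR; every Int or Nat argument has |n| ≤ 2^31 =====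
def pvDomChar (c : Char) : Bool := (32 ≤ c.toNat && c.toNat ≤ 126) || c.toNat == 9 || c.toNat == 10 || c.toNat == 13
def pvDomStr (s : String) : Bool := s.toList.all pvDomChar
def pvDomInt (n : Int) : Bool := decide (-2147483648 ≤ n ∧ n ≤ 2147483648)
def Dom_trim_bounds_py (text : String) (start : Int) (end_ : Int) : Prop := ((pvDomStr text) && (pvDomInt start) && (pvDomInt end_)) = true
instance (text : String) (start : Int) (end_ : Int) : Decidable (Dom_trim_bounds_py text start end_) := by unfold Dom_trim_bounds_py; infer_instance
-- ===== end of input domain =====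

-- B replaces the two pointer-advancing while loops by one slice plus lstrip/strip length arithmetic (idiomatic; same cost).

-- _TRIM_CHARS
def pvTrimChars : List Char := " \t\r\n\"'`.,:;!?()[]{}<>".toList

-- 'c in _TRIM_CHARS' for the single character c (exact: single-char 'in' on a str is membership)
def pvIsTrim (c : Char) : Bool := pvTrimChars.contains c

-- ===== PORT A =====
-- while left < right and text[left] in _TRIM_CHARS: left += 1
def pvTrimLeftLoop (cs : List Char) (left right : Int) : Int :=
  if h : left < right ∧ ((PySem.List.pyGet? cs left).map pvIsTrim).getD false = true then
    pvTrimLeftLoop cs (left + 1) right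
  else left
termination_by (right - left).toNat
decreasing_by omega

-- while right > left and text[right - 1] in _TRIM_CHARS: right -= 1
def pvTrimRightLoop (cs : List Char) (left right : Int) : Int :=
  if h : right > left ∧ ((PySem.List.pyGet? cs (right - 1)).map pvIsTrim).getD false = true then
    pvTrimRightLoop cs left (right - 1)
  else right
termination_by (right - left).toNat
decreasing_by omega

def trim_bounds_py (text : String) (start : Int) (end_ : Int) : Int × Int :=
  let left := max 0 start
  let right := min (text.toList.length : Int) end_
  let left' := pvTrimLeftLoop text.toList left right
  let right' := pvTrimRightLoop text.toList left' right
  (left', right')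

-- ===== PORT B =====
def trim_bounds_py_alt (text : String) (start : Int) (end_ : Int) : Int × Int :=
  let cs := text.toList
  let left := max 0 start
  let right := min (cs.length : Int) end_
  if left ≥ right then (left, right)
  else
    let seg := PySem.List.slice cs (some left) (some right)
    -- seg.lstrip(_TRIM_CHARS): dropWhile on the trim set (exact; PySem.Chars has no chars-argument lstrip)
    let newLeft := left + ((seg.length : Int) - ((seg.dropWhile pvIsTrim).length : Int))
    -- seg.strip(_TRIM_CHARS)
    (newLeft, newLeft + ((PySem.Chars.stripChars seg pvTrimChars).length : Int))

-- ===== PRECONDITION & SPEC =====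
def Spec_trim_bounds_py (text : String) (start : Int) (end_ : Int) (out : Int × Int) : Prop := out = trim_bounds_py_alt text start end_
instance (text : String) (start : Int) (end_ : Int) (out : Int × Int) : Decidable (Spec_trim_bounds_py text start end_ out) := by unfold Spec_trim_bounds_py; infer_instance

-- ===== CLAIM (what is proved, stated in full; the proofs are below) =====
def Claim_equal_trim_bounds_py : Prop := ∀ (text : String) (start : Int) (end_ : Int), Dom_trim_bounds_py text start end_ → Spec_trim_bounds_py text start end_ (trim_bounds_py text start end_)

-- ===== LEMMAS AND PROOFS =====

lemma pvSlice_cons (cs : List Char) (a b : Int) (h0 : 0 ≤ a) (hab : a < b) (hb : b ≤ cs.length)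
    (ha : a.toNat < cs.length) :
    PySem.List.slice cs (some a) (some b) = cs[a.toNat] :: PySem.List.slice cs (some (a+1)) (some b) := by
  rw [PySem.List.slice_toNat cs h0 (by omega), PySem.List.slice_toNat cs (a := a + 1) (by omega) (by omega)]
  rw [List.drop_eq_getElem_cons ha]
  obtain ⟨k, hk⟩ : ∃ k, b.toNat - a.toNat = k + 1 := ⟨b.toNat - a.toNat - 1, by omega⟩
  rw [hk, List.take_succ_cons]
  have h1 : (a + 1).toNat = a.toNat + 1 := by omega
  have h2 : b.toNat - (a.toNat + 1) = k := by omega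
  rw [h1, h2]

lemma pvSlice_nil (cs : List Char) (a b : Int) (h0 : 0 ≤ a) (hab : b ≤ a) (hb : 0 ≤ b) :
    PySem.List.slice cs (some a) (some b) = [] := by
  rw [PySem.List.slice_toNat cs h0 hb]
  have : b.toNat - a.toNat = 0 := by omega
  simp [this]

lemma pvSlice_snoc (cs : List Char) (a b : Int) (h0 : 0 ≤ a) (hab : a < b) (hb : b ≤ cs.length)
    (hb1 : (b - 1).toNat < cs.length) :
    PySem.List.slice cs (some a) (some b)
      = PySem.List.slice cs (some a) (some (b - 1)) ++ [cs[(b - 1).toNat]] := by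
  rw [PySem.List.slice_toNat cs h0 (by omega), PySem.List.slice_toNat cs h0 (by omega)]
  obtain ⟨n, hn⟩ : ∃ n, b.toNat - a.toNat = n + 1 := ⟨b.toNat - a.toNat - 1, by omega⟩
  rw [hn, List.take_succ]
  have h1 : (b - 1).toNat - a.toNat = n := by omega
  rw [h1]
  congr 1
  rw [List.getElem?_drop]
  have h2 : a.toNat + n = (b - 1).toNat := by omega
  rw [h2, List.getElem?_eq_getElem hb1]
  rfl

lemma pvSlice_add_drop (cs : List Char) (a b : Int) (k : Nat) (h0 : 0 ≤ a) (hb : 0 ≤ b) :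
    PySem.List.slice cs (some (a + k)) (some b) = (PySem.List.slice cs (some a) (some b)).drop k := by
  rw [PySem.List.slice_toNat cs (by omega) hb, PySem.List.slice_toNat cs h0 hb]
  rw [List.drop_take, List.drop_drop]
  have h1 : (a + (k : Int)).toNat = a.toNat + k := by omega
  rw [h1]
  have h2 : b.toNat - (a.toNat + k) = b.toNat - a.toNat - k := by omega
  rw [h2]

lemma pvTrimLeftLoop_eq (cs : List Char) (left right : Int)
    (h0 : 0 ≤ left) (hlr : left ≤ right) (hr : right ≤ cs.length) :
    pvTrimLeftLoop cs left right
      = left + (((PySem.List.slice cs (some left) (some right)).takeWhile pvIsTrim).length : Int) := by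
  revert h0 hlr
  fun_induction pvTrimLeftLoop cs left right with
  | case1 left hcond ih =>
    intro h0 hlr
    obtain ⟨hlt, hp⟩ := hcond
    have ha : left.toNat < cs.length := by omega
    have hget : PySem.List.pyGet? cs left = some cs[left.toNat] :=
      PySem.List.pyGet?_eq_some_getElem cs h0 (by omega)
    rw [hget] at hp
    simp only [Option.map_some, Option.getD_some] at hp
    rw [pvSlice_cons cs left right h0 hlt hr ha, List.takeWhile_cons_of_pos hp]
    rw [ih (by omega) (by omega)]
    simp only [List.length_cons]
    push_cast
    omega
  | case2 left hcond =>
    intro h0 hlr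
    rcases lt_or_ge left right with hlt | hge
    · -- condition char not trim
      have ha : left.toNat < cs.length := by omega
      have hget : PySem.List.pyGet? cs left = some cs[left.toNat] :=
        PySem.List.pyGet?_eq_some_getElem cs h0 (by omega)
      have hp : pvIsTrim cs[left.toNat] = false := by
        by_contra hc
        exact hcond ⟨hlt, by rw [hget]; simpa using eq_true_of_ne_false hc⟩
      rw [pvSlice_cons cs left right h0 hlt hr ha, List.takeWhile_cons_of_neg (by simp [hp])]
      simp
    · rw [pvSlice_nil cs left right h0 hge (by omega)]
      simp

lemma pvTrimRightLoop_eq (cs : List Char) (left right : Int)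
    (h0 : 0 ≤ left) (hlr : left ≤ right) (hr : right ≤ cs.length) :
    pvTrimRightLoop cs left right
      = right - (((PySem.List.slice cs (some left) (some right)).reverse.takeWhile pvIsTrim).length : Int) := by
  revert hlr hr
  fun_induction pvTrimRightLoop cs left right with
  | case1 right hcond ih =>
    intro hlr hr
    obtain ⟨hgt, hp⟩ := hcond
    have hb1 : (right - 1).toNat < cs.length := by omega
    have hget : PySem.List.pyGet? cs (right - 1) = some cs[(right - 1).toNat] :=
      PySem.List.pyGet?_eq_some_getElem cs (by omega) (by omega)
    rw [hget] at hp
    simp only [Option.map_some, Option.getD_some] at hp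
    rw [pvSlice_snoc cs left right h0 (by omega) hr hb1]
    rw [List.reverse_append, List.reverse_singleton, List.singleton_append,
        List.takeWhile_cons_of_pos hp]
    rw [ih (by omega) (by omega)]
    simp only [List.length_cons]
    push_cast
    omega
  | case2 right hcond =>
    intro hlr hr
    rcases lt_or_ge left right with hlt | hge
    · have hb1 : (right - 1).toNat < cs.length := by omega
      have hget : PySem.List.pyGet? cs (right - 1) = some cs[(right - 1).toNat] :=
        PySem.List.pyGet?_eq_some_getElem cs (by omega) (by omega)
      have hp : pvIsTrim cs[(right - 1).toNat] = false := by
        by_contra hc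
        exact hcond ⟨hlt, by rw [hget]; simpa using eq_true_of_ne_false hc⟩
      have he : (right - 1).toNat = right.toNat - 1 := by omega
      simp only [he] at hp
      rw [pvSlice_snoc cs left right h0 hlt hr hb1]
      rw [List.reverse_append, List.reverse_singleton, List.singleton_append,
          List.takeWhile_cons_of_neg (by simp [he, hp])]
      simp
    · rw [pvSlice_nil cs left right h0 (by omega) (by omega)]
      simp

lemma trim_bounds_py_eq_alt (text : String) (start : Int) (end_ : Int) :
    trim_bounds_py text start end_ = trim_bounds_py_alt text start end_ := by
  simp only [trim_bounds_py, trim_bounds_py_alt]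
  set cs := text.toList with hcs
  set left := max 0 start with hleft
  set right := min (cs.length : Int) end_ with hright
  have h0 : 0 ≤ left := le_max_left 0 start
  have hr : right ≤ cs.length := min_le_left _ _
  by_cases hge : left ≥ right
  · rw [if_pos hge]
    rw [pvTrimLeftLoop, dif_neg (fun hc => absurd hc.1 (by omega))]
    rw [pvTrimRightLoop, dif_neg (fun hc => absurd hc.1 (by omega))]
  · replace hge : left < right := by omega
    rw [if_neg (by omega)]
    have hA1 := pvTrimLeftLoop_eq cs left right h0 (by omega) hr
    set seg := PySem.List.slice cs (some left) (some right) with hseg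
    set tw := seg.takeWhile pvIsTrim with htw
    set dw := seg.dropWhile pvIsTrim with hdw
    have hsegd : tw ++ dw = seg := List.takeWhile_append_dropWhile
    have hlen : seg.length = tw.length + dw.length := by rw [← hsegd]; simp
    have hseglen : (seg.length : Int) = right - left := by
      rw [hseg, PySem.List.slice_toNat cs h0 (by omega)]
      simp only [List.length_take, List.length_drop]
      omega
    have hdrop : PySem.List.slice cs (some (left + (tw.length : Int))) (some right) = dw := by
      rw [pvSlice_add_drop cs left right tw.length h0 (by omega), ← hseg, ← hsegd, List.drop_left]
    have hA2 := pvTrimRightLoop_eq cs (left + (tw.length : Int)) right (by omega)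
      (by omega) hr
    rw [hdrop] at hA2
    have hpv : pvIsTrim = fun c => decide (c ∈ pvTrimChars) := by funext c; simp [pvIsTrim]
    have hstrip : (PySem.Chars.stripChars seg pvTrimChars).length
        = (dw.reverse.dropWhile pvIsTrim).length := by
      simp [PySem.Chars.stripChars, hpv, hdw]
    have hdwlen : (dw.reverse.dropWhile pvIsTrim).length + (dw.reverse.takeWhile pvIsTrim).length
        = dw.length := by
      have h : (dw.reverse.takeWhile pvIsTrim).length + (dw.reverse.dropWhile pvIsTrim).length
          = dw.length := by
        rw [← List.length_append, List.takeWhile_append_dropWhile, List.length_reverse]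
      omega
    rw [hA1, hA2, hstrip]
    simp only [Prod.mk.injEq]
    constructor <;> omega

-- ===== VERDICT (by name: the statement is the Claim_ definition above) =====
theorem trim_bounds_py_spec : Claim_equal_trim_bounds_py := by
  intro text start end_ _hdom
  unfold Spec_trim_bounds_py
  exact trim_bounds_py_eq_alt text start end_
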